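-- pv_equiv track=rewrite | github.com/supermetalearning/AI | Analyzer.py | grid_has_90_degree_symmetry
-- ===== SOURCE A (Python) =====
-- def grid_has_90_degree_symmetry(grid):
--     # Handle empty grid case
--     if not grid:
--         return True
--
--     rows = len(grid)
--     cols = len(grid[0])
--
--     # Grid must be square for 90 degree rotational symmetry
--     if rows != cols:
--         return False
--
--     for r in range(rows):
--         for c in range(cols):
--             # For 90 degree rotation: (r,c) -> (c, n-1-r)
--             if grid[r][c] != grid[c][rows-1-r]:
--                 return False
--     return True
-- ===== SOURCE B (Python) =====
-- def grid_has_90_degree_symmetry(grid):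
--     if not grid:
--         return True
--     if len(grid) != len(grid[0]):
--         return False
--     rotated = [list(row) for row in reversed(list(zip(*grid)))]
--     return grid == rotated
-- ===== Notes on version B (the rewrite author's own statement) =====
-- stated objective: idiomatic
-- what changed: Replaces the short-circuiting nested index loop with building the 90-degree-rotated grid via zip/reversed and comparing it to the original with a single structural equality.
-- outside the precondition, e.g. on grid_has_90_degree_symmetry([[1, 2], [3]]): A returns False, B returns False; on grid_has_90_degree_symmetry([[0, 0], [0, 0, 1]]): A returns True, B returns False; on grid_has_90_degree_symmetry([[1, 1], [1]]): A raises IndexError, B returns False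
import Mathlib
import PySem

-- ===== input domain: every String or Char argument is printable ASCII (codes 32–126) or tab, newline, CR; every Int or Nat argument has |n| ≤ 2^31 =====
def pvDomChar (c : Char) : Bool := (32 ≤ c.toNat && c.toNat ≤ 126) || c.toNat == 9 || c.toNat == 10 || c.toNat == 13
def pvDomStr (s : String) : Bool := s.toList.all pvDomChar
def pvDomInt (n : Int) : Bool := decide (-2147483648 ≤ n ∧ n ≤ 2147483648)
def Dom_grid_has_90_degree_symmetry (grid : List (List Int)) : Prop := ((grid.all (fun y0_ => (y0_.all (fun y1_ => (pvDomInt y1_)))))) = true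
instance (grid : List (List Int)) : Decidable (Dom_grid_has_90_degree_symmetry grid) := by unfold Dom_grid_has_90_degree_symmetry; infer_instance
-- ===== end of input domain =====

-- B replaces A's short-circuiting nested index scan by materializing the 90°-rotated grid
-- (a zip/reversed transpose) and one structural equality; objective: idiomatic, same cost.

-- ===== PORT A =====
def grid_has_90_degree_symmetry (grid : List (List Int)) : Bool :=
  if grid = [] then true
  else
    let rows : Nat := grid.length
    let cols : Nat := (grid.headD []).length
    if rows ≠ cols then false
    else
      (PySem.List.pyRange 0 (rows : Int) 1).all (fun r =>
        (PySem.List.pyRange 0 (cols : Int) 1).all (fun c =>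
          ((PySem.List.pyGet? grid r).bind (fun row => PySem.List.pyGet? row c)) ==
          ((PySem.List.pyGet? grid c).bind (fun row => PySem.List.pyGet? row ((rows : Int) - 1 - r)))))

-- ===== PORT B =====
-- termination measure fact for pvZipStar (cited in decreasing_by)
theorem pvTailLen_sum_le (ls : List (List Int)) :
    ((ls.map (fun r => r.tail)).map List.length).sum ≤ (ls.map List.length).sum := by
  induction ls with
  | nil => simp
  | cons a l ih =>
    simp only [List.map_cons, List.sum_cons]
    have : a.tail.length ≤ a.length := by
      cases a <;> simp
    omega

theorem pvZipStar_dec (ls : List (List Int)) (h1 : ls ≠ [])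
    (h2 : (ls.any (fun r => r.isEmpty)) ≠ true) :
    ((ls.map (fun r => r.tail)).map List.length).sum < (ls.map List.length).sum := by
  cases ls with
  | nil => exact absurd rfl h1
  | cons a l =>
    have ha : a ≠ [] := by
      intro he; apply h2; simp [he]
    have h3 := pvTailLen_sum_le l
    have h4 : a.tail.length < a.length := by
      cases a with
      | nil => exact absurd rfl ha
      | cons x xs => simp
    simp only [List.map_cons, List.sum_cons]
    omega

-- transcription of Python's zip(*ls): truncates at the shortest row
def pvZipStar (ls : List (List Int)) : List (List Int) :=
  if h : ls = [] ∨ (ls.any (fun r => r.isEmpty)) = true then []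
  else (ls.map (fun r => r.headD 0)) :: pvZipStar (ls.map (fun r => r.tail))
termination_by (ls.map List.length).sum
decreasing_by
  simp only [List.map_subtype, List.unattach_attach]
  exact pvZipStar_dec ls (fun he => h (Or.inl he)) (fun ha => h (Or.inr ha))

def grid_has_90_degree_symmetry_alt (grid : List (List Int)) : Bool :=
  if grid = [] then true
  else if grid.length ≠ (grid.headD []).length then false
  else
    -- rotated = [list(row) for row in reversed(list(zip(*grid)))]; list(row) is the identity here
    let rotated := (pvZipStar grid).reverse
    grid == rotated

-- ===== PRECONDITION & SPEC =====
-- Pre_ excludes only ragged grids whose first-row length equals the row count: no 90° rotation is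
-- well-defined there — A raises IndexError or judges just the leading square window while B's
-- truncating zip comparison returns False; non-square and rectangular grids all stay inside.
def Pre_grid_has_90_degree_symmetry (grid : List (List Int)) : Prop :=
  grid.length = (grid.headD []).length → ∀ row ∈ grid, row.length = grid.length
instance (grid : List (List Int)) : Decidable (Pre_grid_has_90_degree_symmetry grid) := by
  unfold Pre_grid_has_90_degree_symmetry; infer_instance
def pvWitness_grid_has_90_degree_symmetry : List (List Int) := [[1, 2], [2, 1]]
def Spec_grid_has_90_degree_symmetry (grid : List (List Int)) (out : Bool) : Prop := out = grid_has_90_degree_symmetry_alt grid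
instance (grid : List (List Int)) (out : Bool) : Decidable (Spec_grid_has_90_degree_symmetry grid out) := by unfold Spec_grid_has_90_degree_symmetry; infer_instance

-- ===== CLAIM (what is proved, stated in full; the proofs are below) =====
def Claim_equal_grid_has_90_degree_symmetry : Prop := ∀ (grid : List (List Int)), Dom_grid_has_90_degree_symmetry grid → Pre_grid_has_90_degree_symmetry grid → Spec_grid_has_90_degree_symmetry grid (grid_has_90_degree_symmetry grid)

-- ===== LEMMAS AND PROOFS =====

theorem getD_succ_tail (r : List Int) (i : Nat) : r.getD (i + 1) 0 = r.tail.getD i 0 := by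
  cases r <;> simp

-- pvZipStar on a nonempty rectangular grid is the index-wise transpose
theorem pvZipStar_rect (n : Nat) : ∀ (ls : List (List Int)), ls ≠ [] →
    (∀ row ∈ ls, row.length = n) →
    pvZipStar ls = (List.range n).map (fun i => ls.map (fun r => r.getD i 0)) := by
  induction n with
  | zero =>
    intro ls h1 h2
    have hany : (ls.any (fun r => r.isEmpty)) = true := by
      cases ls with
      | nil => exact absurd rfl h1
      | cons a l =>
        have := h2 a (by simp)
        simp only [List.any_cons, Bool.or_eq_true]
        left
        simpa [List.isEmpty_iff] using List.eq_nil_of_length_eq_zero this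
    rw [pvZipStar.eq_def]
    simp [hany]
  | succ n ih =>
    intro ls h1 h2
    have hne : ∀ row ∈ ls, row ≠ [] := by
      intro row hr he
      have := h2 row hr
      simp [he] at this
    have hany : ¬ ((ls.any (fun r => r.isEmpty)) = true) := by
      simp only [List.any_eq_true, not_exists, not_and]
      intro r hr
      simpa [List.isEmpty_iff] using hne r hr
    rw [pvZipStar.eq_def, dif_neg (by push_neg; exact ⟨h1, by simpa using hany⟩)]
    have htl := ih (ls.map (fun r => r.tail)) (by simpa using h1)
      (by
        intro row hr
        simp only [List.mem_map] at hr
        obtain ⟨r, hrm, rfl⟩ := hr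
        have := h2 r hrm
        simp [List.length_tail, this])
    rw [htl, List.range_succ_eq_map, List.map_cons, List.map_map]
    congr 1
    · exact List.map_congr_left (fun r hr => by
        have hr' := hne r hr
        cases r with
        | nil => exact absurd rfl hr'
        | cons x xs => simp)
    · exact List.map_congr_left (fun i _ => by
        rw [List.map_map]
        exact List.map_congr_left (fun r _ => by
          simp only [Function.comp, Nat.succ_eq_add_one]
          exact (getD_succ_tail r i).symm))

-- the reversed transpose, read off entrywise (as getD)
theorem pv_rot_getD (grid : List (List Int)) (k : Nat) (hk : k < grid.length) :
    ((List.range grid.length).map (fun i => grid.map (fun r => r.getD i 0))).reverse.getD k [] =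
      grid.map (fun r => r.getD (grid.length - 1 - k) 0) := by
  rw [List.getD_eq_getElem _ _ (by simpa using hk)]
  rw [List.getElem_reverse, List.getElem_map, List.getElem_range]
  simp only [List.length_map, List.length_range]

theorem pv_all_map_cast (n : Nat) (p : Int → Bool) :
    (((List.range n).map (fun (k : Nat) => (k : Int))).all p = true) ↔ ∀ k, k < n → p ↑k = true := by
  simp [List.all_eq_true]

-- one cell of A's comparison, as a decide on getD entries
theorem pv_cell (grid : List (List Int))
    (hrect : ∀ row ∈ grid, row.length = grid.length) (k j : Nat)
    (hk : k < grid.length) (hj : j < grid.length) :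
    (((PySem.List.pyGet? grid (k : Int)).bind (fun row => PySem.List.pyGet? row (j : Int))) ==
      ((PySem.List.pyGet? grid (j : Int)).bind (fun row =>
        PySem.List.pyGet? row ((grid.length : Int) - 1 - (k : Int))))) =
      decide ((grid.getD k []).getD j 0 = (grid.getD j []).getD (grid.length - 1 - k) 0) := by
  have hrk : (grid.getD k []).length = grid.length :=
    hrect _ (by rw [List.getD_eq_getElem _ _ hk]; exact List.getElem_mem hk)
  have hrj : (grid.getD j []).length = grid.length :=
    hrect _ (by rw [List.getD_eq_getElem _ _ hj]; exact List.getElem_mem hj)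
  have hcast : ((grid.length : Int) - 1 - (k : Int)) = ((grid.length - 1 - k : Nat) : Int) := by
    omega
  have hj' : j < (grid.getD k []).length := by omega
  have hm : grid.length - 1 - k < (grid.getD j []).length := by omega
  rw [hcast, PySem.List.pyGet?_natCast grid k, PySem.List.pyGet?_natCast grid j,
      List.getElem?_eq_getElem hk, List.getElem?_eq_getElem hj,
      ← List.getD_eq_getElem grid ([] : List Int) hk, ← List.getD_eq_getElem grid ([] : List Int) hj]
  show ((PySem.List.pyGet? (grid.getD k []) (j : Int)) ==
      (PySem.List.pyGet? (grid.getD j []) ((grid.length - 1 - k : Nat) : Int))) = _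
  rw [PySem.List.pyGet?_natCast, PySem.List.pyGet?_natCast,
      List.getElem?_eq_getElem hj', List.getElem?_eq_getElem hm,
      List.getD_eq_getElem _ (0 : Int) hj', List.getD_eq_getElem _ (0 : Int) hm]
  rfl

-- A's scan (already reduced to Nat ranges) is true iff the entrywise rotation property holds
theorem pv_A_iff (grid : List (List Int))
    (hrect : ∀ row ∈ grid, row.length = grid.length) :
    ((((List.range grid.length).map (fun (k : Nat) => (k : Int))).all (fun r =>
        (((List.range grid.length).map (fun (k : Nat) => (k : Int))).all (fun c =>
          ((PySem.List.pyGet? grid r).bind (fun row => PySem.List.pyGet? row c)) ==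
          ((PySem.List.pyGet? grid c).bind (fun row =>
              PySem.List.pyGet? row ((grid.length : Int) - 1 - r))))))) = true) ↔
      (∀ k j : Nat, k < grid.length → j < grid.length →
        (grid.getD k []).getD j 0 = (grid.getD j []).getD (grid.length - 1 - k) 0) := by
  rw [pv_all_map_cast]
  constructor
  · intro h k j hk hj
    have hh := (pv_all_map_cast _ _).mp (h k hk) j hj
    rw [pv_cell grid hrect k j hk hj, decide_eq_true_eq] at hh
    exact hh
  · intro h k hk
    rw [pv_all_map_cast]
    intro j hj
    rw [pv_cell grid hrect k j hk hj, decide_eq_true_eq]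
    exact h k j hk hj

-- B's comparison with the reversed transpose is true iff the same property holds
theorem pv_B_iff (grid : List (List Int))
    (hrect : ∀ row ∈ grid, row.length = grid.length) :
    (grid = ((List.range grid.length).map (fun i => grid.map (fun r => r.getD i 0))).reverse) ↔
      (∀ k j : Nat, k < grid.length → j < grid.length →
        (grid.getD k []).getD j 0 = (grid.getD j []).getD (grid.length - 1 - k) 0) := by
  constructor
  · intro h k j hk hj
    have hrow : grid.getD k [] = grid.map (fun r => r.getD (grid.length - 1 - k) 0) :=
      (congrArg (fun l => l.getD k ([] : List Int)) h).trans (pv_rot_getD grid k hk)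
    rw [hrow, List.getD_eq_getElem _ _ (by simpa using hj), List.getElem_map,
        ← List.getD_eq_getElem grid _ hj]
  · intro h
    apply List.ext_getElem (by simp)
    intro i h1 h2
    have hi : i < grid.length := h1
    have e2 : ((List.range grid.length).map
        (fun i => grid.map (fun r => r.getD i 0))).reverse[i] =
        grid.map (fun r => r.getD (grid.length - 1 - i) 0) := by
      rw [← List.getD_eq_getElem _ ([] : List Int) h2]
      exact pv_rot_getD grid i hi
    rw [e2]
    have hri : grid[i].length = grid.length := hrect _ (List.getElem_mem hi)
    apply List.ext_getElem (by simpa using hri)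
    intro j hj1 hj2
    have hj : j < grid.length := by simpa using hj2
    rw [List.getElem_map]
    have e3 := h i j hi hj
    rw [List.getD_eq_getElem grid ([] : List Int) hi,
        List.getD_eq_getElem grid ([] : List Int) hj,
        List.getD_eq_getElem (grid[i]) (0 : Int) hj1] at e3
    exact e3

-- ===== VERDICT (by name: the statement is the Claim_ definition above) =====
theorem grid_has_90_degree_symmetry_spec : Claim_equal_grid_has_90_degree_symmetry := by
  intro grid _ hpre
  unfold Spec_grid_has_90_degree_symmetry grid_has_90_degree_symmetry grid_has_90_degree_symmetry_alt
  by_cases hE : grid = []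
  · simp [hE]
  · by_cases hsq : grid.length = (grid.headD []).length
    · have hrect : ∀ row ∈ grid, row.length = grid.length := hpre hsq
      simp only [if_neg hE, ← hsq, ne_eq, not_true_eq_false, if_false]
      rw [pvZipStar_rect grid.length grid hE hrect, PySem.List.pyRange_zero_natCast,
          Bool.eq_iff_iff, beq_iff_eq, pv_A_iff grid hrect, pv_B_iff grid hrect]
    · have hsq' : ¬ grid.length = (grid.head?.getD []).length := by
        simpa [List.headD_eq_head?_getD] using hsq
      simp [hE, hsq']
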